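-- pv_equiv track=rewrite | github.com/hoyla/meridian | anomalies.py | _sign_runs
-- ===== SOURCE A (Python) =====
-- def _sign_runs(signs: list[int]) -> list[tuple[int, int, int]]:
--     """Collapse a sign sequence into [(sign, start_idx, end_idx_inclusive), ...].
--     Zero values are absorbed into the surrounding non-zero run; if the series
--     starts with zeros, they're absorbed into the first non-zero run."""
--     n = len(signs)
--     if n == 0:
--         return []
--     # Find first non-zero sign to anchor. If the whole thing is zero, return one zero run.
--     first_nz = next((s for s in signs if s != 0), 0)
--     if first_nz == 0:
--         return [(0, 0, n - 1)]
--     runs: list[tuple[int, int, int]] = []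
--     current = first_nz
--     start = 0
--     for i in range(n):
--         s = signs[i]
--         if s != 0 and s != current:
--             runs.append((current, start, i - 1))
--             current = s
--             start = i
--     runs.append((current, start, n - 1))
--     return runs
-- ===== SOURCE B (Python) =====
-- def _sign_runs(signs: list[int]) -> list[tuple[int, int, int]]:
--     n = len(signs)
--     if n == 0:
--         return []
--     nz = [(i, s) for i, s in enumerate(signs) if s != 0]
--     if not nz:
--         return [(0, 0, n - 1)]
--     # nz entries whose sign differs from the previous non-zero sign start a new run
--     breaks = [p for p, q in zip(nz[1:], nz) if p[1] != q[1]]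
--     sgns = [nz[0][1]] + [s for _, s in breaks]
--     starts = [0] + [i for i, _ in breaks]
--     ends = [i - 1 for i, _ in breaks] + [n - 1]
--     return list(zip(sgns, starts, ends))
-- ===== Notes on version B (the rewrite author's own statement) =====
-- stated objective: alternative
-- what changed: Replaces the stateful change-detection loop (current/start mutated while emitting) with a stateless filter-group-pair decomposition: filter the non-zero (index,sign) pairs, find run boundaries by zipping the list with its own tail, then zip the sign/start/end columns into the runs.
import Mathlib
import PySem

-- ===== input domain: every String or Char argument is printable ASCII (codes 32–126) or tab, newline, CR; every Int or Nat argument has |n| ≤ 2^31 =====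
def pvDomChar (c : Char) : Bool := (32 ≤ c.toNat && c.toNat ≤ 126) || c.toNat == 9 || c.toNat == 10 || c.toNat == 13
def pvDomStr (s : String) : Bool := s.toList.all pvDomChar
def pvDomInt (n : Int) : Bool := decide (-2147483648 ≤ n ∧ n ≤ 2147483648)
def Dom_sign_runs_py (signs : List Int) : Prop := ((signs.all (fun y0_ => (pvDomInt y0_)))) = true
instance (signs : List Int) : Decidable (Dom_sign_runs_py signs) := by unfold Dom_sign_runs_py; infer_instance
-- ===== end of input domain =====

-- B replaces A's stateful change-detection loop by a filter/boundary-pairing decomposition (objective: alternative).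

-- ===== PORT A =====
def sign_runs_py (signs : List Int) : List (Int × Int × Int) :=
  let n : Int := signs.length
  if n = 0 then []
  else
    let first_nz : Int := (signs.find? (fun s => s != 0)).getD 0
    if first_nz = 0 then [(0, 0, n - 1)]
    else
      let st := (PySem.List.pyRange 0 n 1).foldl
        (fun (st : List (Int × Int × Int) × Int × Int) i =>
          let s := PySem.List.pyGetD signs i 0
          if s ≠ 0 ∧ s ≠ st.2.1 then (st.1 ++ [(st.2.1, st.2.2, i - 1)], s, i) else st)
        ([], first_nz, 0)
      st.1 ++ [(st.2.1, st.2.2, n - 1)]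

-- ===== PORT B =====
def sign_runs_py_alt (signs : List Int) : List (Int × Int × Int) :=
  let n : Int := signs.length
  if n = 0 then []
  else
    let nz := (PySem.List.enumerate signs 0).filter (fun p => p.2 != 0)
    match nz with
    | [] => [(0, 0, n - 1)]
    | q :: rest =>
      let breaks := ((rest.zip (q :: rest)).filter (fun pq => pq.1.2 != pq.2.2)).map (·.1)
      (q.2 :: breaks.map (·.2)).zip ((0 :: breaks.map (·.1)).zip (breaks.map (fun p => p.1 - 1) ++ [n - 1]))

-- ===== PRECONDITION & SPEC =====
def Spec_sign_runs_py (signs : List Int) (out : List (Int × Int × Int)) : Prop := out = sign_runs_py_alt signs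
instance (signs : List Int) (out : List (Int × Int × Int)) : Decidable (Spec_sign_runs_py signs out) := by unfold Spec_sign_runs_py; infer_instance

-- ===== CLAIM (what is proved, stated in full; the proofs are below) =====
def Claim_equal_sign_runs_py : Prop := ∀ (signs : List Int), Dom_sign_runs_py signs → Spec_sign_runs_py signs (sign_runs_py signs)

-- ===== LEMMAS AND PROOFS =====

/-- A's loop body as a step on (index, sign) pairs. -/
def runStep (st : List (Int × Int × Int) × Int × Int) (p : Int × Int) : List (Int × Int × Int) × Int × Int :=
  if p.2 ≠ 0 ∧ p.2 ≠ st.2.1 then (st.1 ++ [(st.2.1, st.2.2, p.1 - 1)], p.2, p.1) else st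

/-- Common recursive description of the runs produced from a non-zero (index,sign) list. -/
def buildRuns (n c st : Int) : List (Int × Int) → List (Int × Int × Int)
  | [] => [(c, st, n - 1)]
  | p :: rest => if p.2 = c then buildRuns n c st rest else (c, st, p.1 - 1) :: buildRuns n p.2 p.1 rest

theorem foldl_runStep_filter (l : List (Int × Int)) :
    ∀ init, l.foldl runStep init = (l.filter (fun p => p.2 != 0)).foldl runStep init := by
  induction l with
  | nil => intro init; rfl
  | cons p t ih =>
    intro init
    by_cases h : p.2 = 0
    · have hstep : runStep init p = init := by simp [runStep, h]
      simp [h, hstep, ih]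
    · simp [h, ih]

theorem foldl_runStep_eq_buildRuns (n : Int) (l : List (Int × Int)) :
    ∀ (runs0 : List (Int × Int × Int)) (c st : Int), (∀ p ∈ l, p.2 ≠ 0) →
      (l.foldl runStep (runs0, c, st)).1 ++
        [((l.foldl runStep (runs0, c, st)).2.1, (l.foldl runStep (runs0, c, st)).2.2, n - 1)]
      = runs0 ++ buildRuns n c st l := by
  induction l with
  | nil => intro runs0 c st _; simp [buildRuns]
  | cons p t ih =>
    intro runs0 c st h
    have hp : p.2 ≠ 0 := h p (List.mem_cons_self ..)
    have ht : ∀ q ∈ t, q.2 ≠ 0 := fun q hq => h q (List.mem_cons_of_mem _ hq)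
    by_cases hc : p.2 = c
    · have hstep : runStep (runs0, c, st) p = (runs0, c, st) := by
        simp [runStep, hc]
      simp only [List.foldl_cons, hstep, buildRuns, if_pos hc]
      exact ih runs0 c st ht
    · have hstep : runStep (runs0, c, st) p = (runs0 ++ [(c, st, p.1 - 1)], p.2, p.1) := by
        simp [runStep, hp, hc]
      simp only [List.foldl_cons, hstep, buildRuns, if_neg hc]
      rw [ih (runs0 ++ [(c, st, p.1 - 1)]) p.2 p.1 ht]
      simp

theorem zip_breaks_eq_buildRuns (n : Int) (rest : List (Int × Int)) :
    ∀ (prev : Int × Int) (st : Int),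
      ((prev.2 :: (((rest.zip (prev :: rest)).filter (fun pq => pq.1.2 != pq.2.2)).map (·.1)).map (·.2)).zip
        ((st :: (((rest.zip (prev :: rest)).filter (fun pq => pq.1.2 != pq.2.2)).map (·.1)).map (·.1)).zip
          ((((rest.zip (prev :: rest)).filter (fun pq => pq.1.2 != pq.2.2)).map (·.1)).map (fun p => p.1 - 1) ++ [n - 1])))
      = buildRuns n prev.2 st rest := by
  induction rest with
  | nil => intro prev st; simp [buildRuns]
  | cons p t ih =>
    intro prev st
    by_cases hc : p.2 = prev.2
    · have := ih p st
      simp only [List.zip_cons_cons, List.filter_cons, buildRuns, if_pos hc]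
      have hb : (p.2 != prev.2) = false := by simp [hc]
      rw [hb]
      simp only [Bool.false_eq_true, if_false]
      rw [← hc]
      exact this
    · have hb : (p.2 != prev.2) = true := by simp [hc]
      simp only [List.zip_cons_cons, List.filter_cons, hb, if_true, List.map_cons,
        List.cons_append, buildRuns, if_neg hc]
      rw [ih p p.1]

theorem find_eq_head_filter_enumerate (signs : List Int) :
    ∀ s0 : Int, (signs.find? (fun s => s != 0)).getD 0 =
      (match (PySem.List.enumerate signs s0).filter (fun p => p.2 != 0) with
       | [] => (0 : Int)
       | q :: _ => q.2) := by
  induction signs with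
  | nil => intro s0; simp [PySem.List.enumerate_nil]
  | cons x t ih =>
    intro s0
    rw [PySem.List.enumerate_cons]
    by_cases h : x = 0
    · simp only [List.find?_cons, List.filter_cons]
      have : (x != 0) = false := by simp [h]
      rw [this]
      simp only [Bool.false_eq_true, if_false]
      exact ih (s0 + 1)
    · have : (x != 0) = true := by simp [h]
      simp [this]

theorem mem_filter_nz {signs : List Int} {s0 : Int} {p : Int × Int}
    (hp : p ∈ (PySem.List.enumerate signs s0).filter (fun q => q.2 != 0)) : p.2 ≠ 0 := by
  have := List.of_mem_filter hp
  simpa using this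

-- A's fold over range(n) with signs[i] equals the fold of runStep over enumerate(signs).
theorem foldA_eq_enumerate (signs : List Int) (init : List (Int × Int × Int) × Int × Int) :
    (PySem.List.pyRange 0 (signs.length : Int) 1).foldl
        (fun (st : List (Int × Int × Int) × Int × Int) i =>
          let s := PySem.List.pyGetD signs i 0
          if s ≠ 0 ∧ s ≠ st.2.1 then (st.1 ++ [(st.2.1, st.2.2, i - 1)], s, i) else st) init
      = (PySem.List.enumerate signs 0).foldl runStep init := by
  rw [PySem.List.enumerate_eq_map_pyRange (d := 0), List.foldl_map]
  rfl

theorem sign_runs_eq (signs : List Int) : sign_runs_py signs = sign_runs_py_alt signs := by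
  cases signs with
  | nil => rfl
  | cons x t =>
    unfold sign_runs_py sign_runs_py_alt
    have hn : ((x :: t).length : Int) ≠ 0 := by
      simp only [List.length_cons]; omega
    simp only [hn, if_false]
    rw [foldA_eq_enumerate, foldl_runStep_filter,
      find_eq_head_filter_enumerate (x :: t) 0]
    cases hnz : (PySem.List.enumerate (x :: t) 0).filter (fun p => p.2 != 0) with
    | nil => rfl
    | cons q rest =>
      have hq : q.2 ≠ 0 := mem_filter_nz (by rw [hnz]; exact List.mem_cons_self ..)
      have hall : ∀ p ∈ q :: rest, p.2 ≠ 0 := by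
        intro p hp
        exact mem_filter_nz (signs := x :: t) (s0 := 0) (by rw [hnz]; exact hp)
      simp only [if_neg hq]
      rw [foldl_runStep_eq_buildRuns ((x :: t).length : Int) (q :: rest) [] q.2 0 hall]
      rw [zip_breaks_eq_buildRuns ((x :: t).length : Int) rest q 0]
      simp [buildRuns]

-- ===== VERDICT (by name: the statement is the Claim_ definition above) =====
theorem sign_runs_py_spec : Claim_equal_sign_runs_py := by
  intro signs _
  unfold Spec_sign_runs_py
  exact sign_runs_eq signs
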